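-- pv_equiv track=rewrite | github.com/LefterisKyriazanos/visual_cryptography | visual_cryptography.py | find_subsets_with_parity
-- ===== SOURCE A (Python) =====
-- def find_subsets_with_parity(input_set):
--     even_subsets = []
--     odd_subsets = []
--
--     for i in range(2 ** len(input_set)):
--         # Calculate all possible subsets
--         subset = [input_set[j] for j in range(len(input_set)) if (i & (1 << j)) > 0]
--         if (len(subset) % 2 == 0): # subset has even number of elements
--             even_subsets.append(subset)
--         else:
--             odd_subsets.append(subset)
--
--     return even_subsets, odd_subsets
-- ===== SOURCE B (Python) =====
-- def find_subsets_with_parity(input_set):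
--     # Build the power set incrementally: appending element e doubles the list,
--     # new subsets (with e appended) placed after the old ones -- this reproduces
--     # the bitmask-counting order of the original.
--     subsets = [[]]
--     for e in input_set:
--         subsets = subsets + [s + [e] for s in subsets]
--     even_subsets = []
--     odd_subsets = []
--     for s in subsets:
--         if len(s) % 2 == 0:
--             even_subsets.append(s)
--         else:
--             odd_subsets.append(s)
--     return even_subsets, odd_subsets
-- ===== Notes on version B (the rewrite author's own statement) =====
-- stated objective: alternative
-- what changed: Replaces the per-mask bit scan (for each of the 2^n counters, filtering all n bit positions) with incremental power-set doubling that builds each subset by a single append, followed by one partition pass.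
import Mathlib
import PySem

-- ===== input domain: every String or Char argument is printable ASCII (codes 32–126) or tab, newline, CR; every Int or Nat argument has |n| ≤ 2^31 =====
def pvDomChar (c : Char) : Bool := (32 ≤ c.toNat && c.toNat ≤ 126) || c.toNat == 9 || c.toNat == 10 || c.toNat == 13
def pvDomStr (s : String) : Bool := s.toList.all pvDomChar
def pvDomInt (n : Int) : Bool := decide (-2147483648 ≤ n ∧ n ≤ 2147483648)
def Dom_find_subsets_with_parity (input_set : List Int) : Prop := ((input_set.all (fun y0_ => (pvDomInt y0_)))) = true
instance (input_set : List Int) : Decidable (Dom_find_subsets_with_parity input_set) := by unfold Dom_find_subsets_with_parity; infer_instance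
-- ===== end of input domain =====

-- ===== PORT A =====
-- B replaces the per-mask bit scan with incremental power-set doubling plus one partition pass (same results, same order).
-- inner comprehension of A: [input_set[j] for j in range(len(input_set)) if (i & (1 << j)) > 0]
-- (range bounds are non-negative, so Nat-valued range/indexing is exact here)
def pvSubsetA (input_set : List Int) (i : Nat) : List Int :=
  ((List.range input_set.length).filter (fun j => decide (0 < i &&& (1 <<< j)))).filterMap
    (fun j => input_set[j]?)

def find_subsets_with_parity (input_set : List Int) : List (List Int) × List (List Int) :=
  (List.range (2 ^ input_set.length)).foldl
    (fun (acc : List (List Int) × List (List Int)) i =>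
      let subset := pvSubsetA input_set i
      if subset.length % 2 == 0 then (acc.1 ++ [subset], acc.2) else (acc.1, acc.2 ++ [subset]))
    ([], [])

-- ===== PORT B =====
def find_subsets_with_parity_alt (input_set : List Int) : List (List Int) × List (List Int) :=
  let subsets := input_set.foldl (fun acc e => acc ++ acc.map (fun s => s ++ [e])) [[]]
  subsets.foldl
    (fun (acc : List (List Int) × List (List Int)) s =>
      if s.length % 2 == 0 then (acc.1 ++ [s], acc.2) else (acc.1, acc.2 ++ [s]))
    ([], [])
-- ===== PRECONDITION & SPEC =====
def Spec_find_subsets_with_parity (input_set : List Int) (out : List (List Int) × List (List Int)) : Prop := out = find_subsets_with_parity_alt input_set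
instance (input_set : List Int) (out : List (List Int) × List (List Int)) : Decidable (Spec_find_subsets_with_parity input_set out) := by unfold Spec_find_subsets_with_parity; infer_instance

-- ===== CLAIM (what is proved, stated in full; the proofs are below) =====
def Claim_equal_find_subsets_with_parity : Prop := ∀ (input_set : List Int), Dom_find_subsets_with_parity input_set → Spec_find_subsets_with_parity input_set (find_subsets_with_parity input_set)

-- ===== LEMMAS AND PROOFS =====

-- the power-set list B builds
def pvPow (xs : List Int) : List (List Int) :=
  xs.foldl (fun acc e => acc ++ acc.map (fun s => s ++ [e])) [[]]

lemma pvCond (i j : Nat) : decide (0 < i &&& (1 <<< j)) = i.testBit j := by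
  rw [Nat.one_shiftLeft, Nat.and_two_pow]
  cases h : i.testBit j <;> simp

lemma pvSubsetA_eq (xs : List Int) (i : Nat) :
    pvSubsetA xs i = ((List.range xs.length).filter (fun j => i.testBit j)).filterMap
      (fun j => xs[j]?) := by
  unfold pvSubsetA
  congr 1
  exact List.filter_congr (fun j _ => pvCond i j)

lemma pvSubsetA_snoc_lo (xs : List Int) (e : Int) (i : Nat) (hi : i < 2 ^ xs.length) :
    pvSubsetA (xs ++ [e]) i = pvSubsetA xs i := by
  rw [pvSubsetA_eq, pvSubsetA_eq]
  have hbit : i.testBit xs.length = false := Nat.testBit_eq_false_of_lt hi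
  have hidx : ∀ j ∈ (List.range xs.length).filter (fun j => i.testBit j),
      (xs ++ [e])[j]? = xs[j]? := fun j hj =>
    List.getElem?_append_left (List.mem_range.mp (List.mem_of_mem_filter hj))
  simp only [List.length_append, List.length_singleton, List.range_succ, List.filter_append,
    List.filter_cons, List.filter_nil, hbit, Bool.false_eq_true, reduceIte, List.append_nil]
  exact List.filterMap_congr hidx

lemma pvSubsetA_snoc_hi (xs : List Int) (e : Int) (i : Nat) (hi : i < 2 ^ xs.length) :
    pvSubsetA (xs ++ [e]) (2 ^ xs.length + i) = pvSubsetA xs i ++ [e] := by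
  rw [pvSubsetA_eq, pvSubsetA_eq]
  rw [List.length_append, List.length_singleton, List.range_succ, List.filter_append]
  have hbit : (2 ^ xs.length + i).testBit xs.length = true := by
    rw [Nat.testBit_two_pow_add_eq, Nat.testBit_eq_false_of_lt hi]; rfl
  have hfilter : (List.range xs.length).filter (fun j => (2 ^ xs.length + i).testBit j)
      = (List.range xs.length).filter (fun j => i.testBit j) := by
    exact List.filter_congr (fun j hj =>
      Nat.testBit_two_pow_add_gt (List.mem_range.mp hj) i)
  have hidx : ∀ j ∈ (List.range xs.length).filter (fun j => i.testBit j),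
      (xs ++ [e])[j]? = xs[j]? := fun j hj =>
    List.getElem?_append_left (List.mem_range.mp (List.mem_of_mem_filter hj))
  rw [hfilter]
  simp only [List.filter_cons, List.filter_nil, hbit, reduceIte, List.filterMap_append]
  rw [List.filterMap_congr hidx]
  congr 1
  simp

lemma pvMask_eq_pow (xs : List Int) :
    (List.range (2 ^ xs.length)).map (pvSubsetA xs) = pvPow xs := by
  induction xs using List.reverseRecOn with
  | nil => decide
  | append_singleton xs e ih =>
    have hlen : (xs ++ [e]).length = xs.length + 1 := by simp
    rw [hlen, pow_succ, Nat.mul_two, List.range_add, List.map_append, List.map_map]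
    have h1 : (List.range (2 ^ xs.length)).map (pvSubsetA (xs ++ [e]))
        = (List.range (2 ^ xs.length)).map (pvSubsetA xs) := by
      exact List.map_congr_left (fun i hi =>
        pvSubsetA_snoc_lo xs e i (List.mem_range.mp hi))
    have h2 : (List.range (2 ^ xs.length)).map (pvSubsetA (xs ++ [e]) ∘ (fun x => 2 ^ xs.length + x))
        = ((List.range (2 ^ xs.length)).map (pvSubsetA xs)).map (fun s => s ++ [e]) := by
      rw [List.map_map]
      exact List.map_congr_left (fun i hi =>
        pvSubsetA_snoc_hi xs e i (List.mem_range.mp hi))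
    rw [h1, h2, ih]
    simp [pvPow, List.foldl_append, List.foldl]

-- ===== VERDICT (by name: the statement is the Claim_ definition above) =====
theorem find_subsets_with_parity_spec : Claim_equal_find_subsets_with_parity := by
  intro xs _
  show find_subsets_with_parity xs = find_subsets_with_parity_alt xs
  have h := pvMask_eq_pow xs
  unfold pvPow at h
  unfold find_subsets_with_parity find_subsets_with_parity_alt
  rw [← h, List.foldl_map]
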